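-- pv_equiv track=rewrite | github.com/rishabhvarshney14/Competetive-Coding | algorithms/Binary Search/floor_ele.py | floor_ele
-- ===== SOURCE A (Python) =====
-- def floor_ele(arr, ele):
--   start = 0
--   end = len(arr) - 1
--   result = -1
--
--   while not start > end:
--     mid = start + (end - start) // 2
--     if arr[mid] == ele:
--       return mid
--     elif ele > arr[mid]:
--       result = mid
--       start = mid + 1
--     else:
--       end = mid - 1
--
--   return result
-- ===== SOURCE B (Python) =====
-- def floor_ele(arr, ele):
--     # Phase 1: record the probe path (index, value) of a binary search as a trace.
--     def probes(lo, hi):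
--         if lo > hi:
--             return []
--         mid = (lo + hi) // 2
--         v = arr[mid]
--         if v == ele:
--             return [(mid, v)]
--         if ele > v:
--             return [(mid, v)] + probes(mid + 1, hi)
--         return [(mid, v)] + probes(lo, mid - 1)
--     # Phase 2: read the answer off the trace.
--     t = probes(0, len(arr) - 1)
--     if t and t[-1][1] == ele:
--         return t[-1][0]
--     cands = [p for p in t if ele > p[1]]
--     return cands[-1][0] if cands else -1
-- ===== Notes on version B (the rewrite author's own statement) =====
-- stated objective: alternative
-- what changed: Replaces A's single-pass binary-search loop with a mutable floor accumulator by two staged passes: first materialise the binary-search probe trace as a list of (index, value) pairs, then read the answer off the trace (equal last probe, else last probe with ele > value, else -1).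
import Mathlib
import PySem

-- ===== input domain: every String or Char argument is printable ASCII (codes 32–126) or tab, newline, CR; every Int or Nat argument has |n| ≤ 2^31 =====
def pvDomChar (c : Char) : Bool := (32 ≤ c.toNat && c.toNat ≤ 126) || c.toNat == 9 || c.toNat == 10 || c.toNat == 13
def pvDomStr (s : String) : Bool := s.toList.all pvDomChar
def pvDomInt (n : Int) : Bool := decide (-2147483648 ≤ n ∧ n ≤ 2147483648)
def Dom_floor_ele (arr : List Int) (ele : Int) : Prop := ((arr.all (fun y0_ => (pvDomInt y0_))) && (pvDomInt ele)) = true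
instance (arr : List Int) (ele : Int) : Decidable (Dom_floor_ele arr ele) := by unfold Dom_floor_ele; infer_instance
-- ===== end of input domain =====

-- B replaces A's single accumulator loop by two staged passes: it first materialises
-- the binary-search probe trace as a list, then reads the answer off that trace
-- (alternative decomposition; same cost).
-- Both loops are written with a Nat fuel ≥ the interval size purely as a totality
-- guard (the interval shrinks each step, so the fuel is never exhausted).

-- ===== PORT A =====
-- A's while-loop; the `none` (IndexError) branch is unreachable from floor_ele's call,
-- where 0 ≤ start and end ≤ len-1 keep mid in range.
def floorALoop (arr : List Int) (ele : Int) : Nat → Int → Int → Int → Int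
  | 0, _, _, result => result
  | fuel + 1, start, end_, result =>
    if start > end_ then result
    else
      let mid := start + PySem.Int.floordiv (end_ - start) 2
      match PySem.List.pyGet? arr mid with
      | none => result
      | some v =>
        if v = ele then mid
        else if ele > v then floorALoop arr ele fuel (mid + 1) end_ mid
        else floorALoop arr ele fuel start (mid - 1) result

def floor_ele (arr : List Int) (ele : Int) : Int :=
  floorALoop arr ele (arr.length + 1) 0 ((arr.length : Int) - 1) (-1)

-- ===== PORT B =====
-- Phase 1 of B: the probe trace; `none` unreachable as above.
def floorTrace (arr : List Int) (ele : Int) : Nat → Int → Int → List (Int × Int)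
  | 0, _, _ => []
  | fuel + 1, lo, hi =>
    if lo > hi then []
    else
      let mid := PySem.Int.floordiv (lo + hi) 2
      match PySem.List.pyGet? arr mid with
      | none => []
      | some v =>
        if v = ele then [(mid, v)]
        else if ele > v then (mid, v) :: floorTrace arr ele fuel (mid + 1) hi
        else (mid, v) :: floorTrace arr ele fuel lo (mid - 1)

-- Phase 2 of B: read the answer off the trace (t[-1] = getLast?, the comprehension = filter).
def floor_ele_alt (arr : List Int) (ele : Int) : Int :=
  let t := floorTrace arr ele (arr.length + 1) 0 ((arr.length : Int) - 1)
  match t.getLast? with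
  | some (m, v) =>
      if v = ele then m
      else
        match (t.filter (fun p => ele > p.2)).getLast? with
        | some p => p.1
        | none => -1
  | none => -1

-- ===== PRECONDITION & SPEC =====
def Spec_floor_ele (arr : List Int) (ele : Int) (out : Int) : Prop := out = floor_ele_alt arr ele
instance (arr : List Int) (ele : Int) (out : Int) : Decidable (Spec_floor_ele arr ele out) := by unfold Spec_floor_ele; infer_instance

-- ===== CLAIM (what is proved, stated in full; the proofs are below) =====
def Claim_equal_floor_ele : Prop := ∀ (arr : List Int) (ele : Int), Dom_floor_ele arr ele → Spec_floor_ele arr ele (floor_ele arr ele)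

-- ===== LEMMAS AND PROOFS =====

-- Proof-side generalisation of B's phase 2, with the `-1` fallback generalised to r.
def candLast (ele : Int) (t : List (Int × Int)) (r : Int) : Int :=
  match (t.filter (fun p => ele > p.2)).getLast? with
  | some p => p.1
  | none => r

def procP (ele : Int) (t : List (Int × Int)) (r : Int) : Int :=
  match t.getLast? with
  | some (m, v) => if v = ele then m else candLast ele t r
  | none => r

theorem candLast_cons (ele m v r : Int) (t : List (Int × Int)) :
    candLast ele ((m, v) :: t) r = candLast ele t (if ele > v then m else r) := by
  by_cases h : ele > v
  · simp only [candLast, List.filter_cons, decide_eq_true_eq, if_pos h]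
    cases hf : t.filter (fun p => decide (ele > p.2)) with
    | nil => simp
    | cons a l =>
        simp only [List.getLast?_cons_cons]
        cases hg : (a :: l).getLast? with
        | none => simp at hg
        | some q => rfl
  · simp [candLast, h]

theorem procP_cons (ele m v r : Int) (t : List (Int × Int)) (hne : v ≠ ele) :
    procP ele ((m, v) :: t) r = procP ele t (if ele > v then m else r) := by
  cases t with
  | nil =>
      simp only [procP, List.getLast?_singleton, if_neg hne, candLast_cons]
      rfl
  | cons a t' =>
      simp only [procP, List.getLast?_cons_cons, candLast_cons]
      cases hg : (a :: t').getLast? with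
      | none => simp at hg
      | some q => rfl

-- A's and B's mid agree: s + (e-s)//2 = (s+e)//2 for integer floor division.
theorem mid_eq (s e : Int) :
    PySem.Int.floordiv (s + e) 2 = s + PySem.Int.floordiv (e - s) 2 := by
  rw [PySem.Int.floordiv_eq_ediv_of_pos (by norm_num),
      PySem.Int.floordiv_eq_ediv_of_pos (by norm_num)]
  omega

-- A's accumulator loop equals B's trace recursion read through procP (same fuel).
theorem loop_eq_proc (arr : List Int) (ele : Int) :
    ∀ (fuel : Nat) (start end_ result : Int),
      floorALoop arr ele fuel start end_ result =
        procP ele (floorTrace arr ele fuel start end_) result := by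
  intro fuel
  induction fuel with
  | zero => intro s e r; simp [floorALoop, floorTrace, procP]
  | succ n ih =>
      intro s e r
      rw [floorALoop, floorTrace]
      by_cases h : s > e
      · simp [h, procP]
      · simp only [if_neg h, mid_eq]
        cases hget : PySem.List.pyGet? arr (s + PySem.Int.floordiv (e - s) 2) with
        | none => simp [procP]
        | some v =>
            dsimp only
            by_cases hv : v = ele
            · simp [hv, procP]
            · simp only [if_neg hv]
              by_cases hgt : ele > v
              · simp only [if_pos hgt]
                rw [procP_cons ele _ v r _ hv, if_pos hgt, ih]
              · simp only [if_neg hgt]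
                rw [procP_cons ele _ v r _ hv, if_neg hgt, ih]

-- B's phase 2 is procP at fallback -1.
theorem alt_eq_proc (arr : List Int) (ele : Int) :
    floor_ele_alt arr ele =
      procP ele (floorTrace arr ele (arr.length + 1) 0 ((arr.length : Int) - 1)) (-1) := by
  unfold floor_ele_alt procP candLast
  cases hg : (floorTrace arr ele (arr.length + 1) 0 ((arr.length : Int) - 1)).getLast? with
  | none => simp [hg]
  | some p => cases p with | mk m v => simp [hg]

-- ===== VERDICT (by name: the statement is the Claim_ definition above) =====
theorem floor_ele_spec : Claim_equal_floor_ele := by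
  intro arr ele _
  unfold Spec_floor_ele floor_ele
  rw [loop_eq_proc, alt_eq_proc]
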